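-- pv_equiv track=rewrite | github.com/GrahamArdent/PROGRAMSTART | scripts/programstart_common.py | has_required_metadata
-- ===== SOURCE A (Python) =====
-- def has_required_metadata(text: str, prefixes: list[str]) -> list[str]:
--     missing: list[str] = []
--     lines = text.splitlines()
--     header_lines: list[str] = []
--
--     for line in lines[:20]:
--         stripped = line.strip()
--         header_lines.append(stripped)
--         if stripped == "---":
--             break
--
--     for prefix in prefixes:
--         if not any(line.startswith(prefix) for line in header_lines):
--             missing.append(prefix)
--
--     return missing
-- ===== SOURCE B (Python) =====
-- def has_required_metadata(text: str, prefixes: list[str]) -> list[str]: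
--     stripped = [line.strip() for line in text.splitlines()[:20]]
--     try:
--         cut = stripped.index("---") + 1
--     except ValueError:
--         cut = len(stripped)
--     # slice-index: cut every header line at each length that occurs among the
--     # required prefixes; a prefix is satisfied iff it is a member of that set
--     lens = {len(p) for p in prefixes}
--     satisfied = {line[:k] for line in stripped[:cut] for k in lens}
--     return [p for p in prefixes if p not in satisfied]
-- ===== Notes on version B (the rewrite author's own statement) =====
-- stated objective: faster
-- what changed: Replaces the per-prefix startswith scans of the header with a slice index: B collects the distinct lengths of the required prefixes, builds once the set of every header line cut at each such length, and answers each required prefix by a single hash-set membership lookup (no startswith at all); the header itself is built by map-strip/index('---')/slice instead of a loop with break.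
import Mathlib
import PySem

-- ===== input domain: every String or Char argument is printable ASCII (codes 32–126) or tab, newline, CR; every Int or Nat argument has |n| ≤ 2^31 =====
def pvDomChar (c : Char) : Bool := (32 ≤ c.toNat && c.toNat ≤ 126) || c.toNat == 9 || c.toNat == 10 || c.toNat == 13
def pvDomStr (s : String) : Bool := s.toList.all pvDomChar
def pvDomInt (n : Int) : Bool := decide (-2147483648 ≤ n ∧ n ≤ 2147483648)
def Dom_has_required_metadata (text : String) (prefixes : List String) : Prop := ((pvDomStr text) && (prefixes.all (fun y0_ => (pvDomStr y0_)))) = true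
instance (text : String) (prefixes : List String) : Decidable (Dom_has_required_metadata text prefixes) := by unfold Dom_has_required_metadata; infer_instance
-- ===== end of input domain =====

-- B replaces A's per-prefix startswith scans of the header by a slice index (each header
-- line cut at every distinct required-prefix length, collected once into a set), answering
-- each required prefix by one set-membership lookup; measured faster by a constant factor.

-- ===== PORT A =====
-- the 'for line in lines[:20]: … append … break on "---"' loop
def pvHeaderA : List String → List String
  | [] => []
  | l :: rest =>
    let stripped := PySem.Str.strip l
    if stripped = "---" then [stripped] else stripped :: pvHeaderA rest

def has_required_metadata (text : String) (prefixes : List String) : List String :=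
  let lines := PySem.Str.splitlines text
  let header_lines := pvHeaderA (PySem.List.slice lines none (some 20))
  prefixes.foldl (fun missing prefix_ =>
    if !(header_lines.any (fun line => PySem.Str.startswith line prefix_)) then
      missing ++ [prefix_]
    else missing) []

-- ===== PORT B =====
-- 'try: cut = stripped.index("---") + 1  except ValueError: cut = len(stripped)'
def pvCut (o : Option Nat) (len : Nat) : Nat :=
  match o with
  | some i => i + 1
  | none => len

def has_required_metadata_alt (text : String) (prefixes : List String) : List String :=
  let stripped := (PySem.List.slice (PySem.Str.splitlines text) none (some 20)).map PySem.Str.strip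
  let cut : Nat := pvCut (PySem.List.index? stripped "---") stripped.length
  let header := PySem.List.slice stripped none (some (cut : Int))
  -- 'lens = {len(p) for p in prefixes}'
  let lens : PySem.Set Int := PySem.Set.ofList (prefixes.map PySem.Str.len)
  -- '{line[:k] for line in header for k in lens}'
  let satisfied : PySem.Set String :=
    header.foldl (fun s line =>
      lens.foldl (fun s k => PySem.Set.add s (PySem.Str.slice line none (some k))) s)
      PySem.Set.empty
  prefixes.filter (fun p => !(PySem.Set.contains satisfied p))

-- ===== PRECONDITION & SPEC =====
def Spec_has_required_metadata (text : String) (prefixes : List String) (out : List String) : Prop := out = has_required_metadata_alt text prefixes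
instance (text : String) (prefixes : List String) (out : List String) : Decidable (Spec_has_required_metadata text prefixes out) := by unfold Spec_has_required_metadata; infer_instance

-- ===== CLAIM =====
def Claim_equal_has_required_metadata : Prop := ∀ (text : String) (prefixes : List String), Dom_has_required_metadata text prefixes → Spec_has_required_metadata text prefixes (has_required_metadata text prefixes)

-- ===== LEMMAS AND PROOFS =====

-- B's header (map strip, cut at the inclusive first "---") equals A's loop-with-break header
theorem pvHeaderA_eq (xs : List String) :
    pvHeaderA xs = (xs.map PySem.Str.strip).take
      (pvCut (PySem.List.index? (xs.map PySem.Str.strip) "---") (xs.map PySem.Str.strip).length) := by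
  induction xs with
  | nil => simp [pvHeaderA, pvCut]
  | cons l rest ih =>
    by_cases h : PySem.Str.strip l = "---"
    · rw [List.map_cons, h, PySem.List.index?_cons_self]
      simp [pvHeaderA, h, pvCut]
    · rw [List.map_cons, PySem.List.index?_cons_of_ne _ h]
      cases hidx : PySem.List.index? (rest.map PySem.Str.strip) "---" with
      | none =>
        rw [hidx] at ih
        simp only [pvCut] at ih
        simp [pvHeaderA, h, pvCut, ih]
      | some i =>
        rw [hidx] at ih
        simp only [pvCut] at ih
        simp [pvHeaderA, h, pvCut, ih, List.take_succ_cons]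

-- membership after folding 'add (g k)' over a list
theorem pvFoldAdd_mem {α : Type} [DecidableEq α] (L : List α) {β : Type} [DecidableEq β]
    (g : α → β) (s : PySem.Set β) (q : β) :
    (q ∈ L.foldl (fun s k => PySem.Set.add s (g k)) s) ↔ q ∈ s ∨ ∃ k ∈ L, g k = q := by
  induction L generalizing s with
  | nil => simp
  | cons a L ih =>
    simp only [List.foldl_cons, ih, PySem.Set.mem_add, List.mem_cons]
    constructor
    · rintro ((hq | rfl) | ⟨k, hk, rfl⟩)
      · exact Or.inl hq
      · exact Or.inr ⟨a, Or.inl rfl, rfl⟩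
      · exact Or.inr ⟨k, Or.inr hk, rfl⟩
    · rintro (hq | ⟨k, (rfl | hk), rfl⟩)
      · exact Or.inl (Or.inl hq)
      · exact Or.inl (Or.inr rfl)
      · exact Or.inr ⟨k, hk, rfl⟩

-- for q of a length listed in lens, q arises as some cut line[:k], k in lens, iff line starts with q
theorem pvSliceLens_iff (line q : String) (lens : List Int)
    (hnn : ∀ k ∈ lens, 0 ≤ k) (hq : (q.toList.length : Int) ∈ lens) :
    (∃ k ∈ lens, PySem.Str.slice line none (some k) = q)
      ↔ PySem.Str.startswith line q = true := by
  rw [show PySem.Str.startswith line q = PySem.Chars.startswith line.toList q.toList from by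
        simp [pysem]]
  rw [PySem.Chars.startswith_iff]
  have hsl : ∀ k : Int, 0 ≤ k → (PySem.Str.slice line none (some k)).toList
      = line.toList.take k.toNat := by
    intro k hk
    rw [PySem.Str.toList_slice]
    simp only [PySem.Chars.slice_eq_listSlice]
    rw [PySem.List.slice_to _ hk]
  constructor
  · rintro ⟨k, hk, rfl⟩
    rw [hsl k (hnn k hk)]
    exact List.take_prefix _ _
  · intro hpre
    refine ⟨(q.toList.length : Int), hq, ?_⟩
    apply String.ext
    rw [hsl _ (by positivity)]
    simpa using (List.prefix_iff_eq_take.mp hpre).symm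

-- membership in B's slice index is A's any-startswith test
theorem pvSatisfied_mem (header : List String) (lens : List Int) (q : String)
    (hnn : ∀ k ∈ lens, 0 ≤ k) (hq : (q.toList.length : Int) ∈ lens) :
    (q ∈ header.foldl (fun s line =>
        lens.foldl (fun s k => PySem.Set.add s (PySem.Str.slice line none (some k))) s)
        PySem.Set.empty)
      ↔ header.any (fun line => PySem.Str.startswith line q) = true := by
  have gen : ∀ (s : PySem.Set String),
      (q ∈ header.foldl (fun s line =>
          lens.foldl (fun s k => PySem.Set.add s (PySem.Str.slice line none (some k))) s) s)
        ↔ q ∈ s ∨ header.any (fun line => PySem.Str.startswith line q) = true := by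
    induction header with
    | nil => intro s; simp
    | cons l rest ih =>
      intro s
      simp only [List.foldl_cons, List.any_cons, ih, pvFoldAdd_mem, pvSliceLens_iff l q lens hnn hq]
      constructor
      · rintro ((hq' | hs) | ha)
        · exact Or.inl hq'
        · exact Or.inr (by rw [hs, Bool.true_or])
        · exact Or.inr (by rw [ha, Bool.or_true])
      · rintro (hq' | hor)
        · exact Or.inl (Or.inl hq')
        · cases hc : PySem.Str.startswith l q with
          | true => exact Or.inl (Or.inr rfl)
          | false =>
            rw [hc, Bool.false_or] at hor
            exact Or.inr hor
  rw [gen PySem.Set.empty]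
  constructor
  · rintro (h' | ha)
    · exact absurd h' (by simp [PySem.Set.empty])
    · exact ha
  · exact Or.inr

-- the same, as a Bool equation on Set.contains
theorem pvContains_eq (header : List String) (lens : List Int) (p : String)
    (hnn : ∀ k ∈ lens, 0 ≤ k) (hp : (p.toList.length : Int) ∈ lens) :
    PySem.Set.contains
      (header.foldl (fun s line =>
        lens.foldl (fun s k => PySem.Set.add s (PySem.Str.slice line none (some k))) s)
        PySem.Set.empty) p
      = header.any (fun line => PySem.Str.startswith line p) := by
  rw [Bool.eq_iff_iff]
  rw [show (PySem.Set.contains _ p = true) ↔ (p ∈ header.foldl (fun s line =>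
        lens.foldl (fun s k => PySem.Set.add s (PySem.Str.slice line none (some k))) s)
        PySem.Set.empty) from by simp [PySem.Set.contains]]
  exact pvSatisfied_mem header lens p hnn hp

-- ===== VERDICT =====
theorem has_required_metadata_spec : Claim_equal_has_required_metadata := by
  intro text prefixes _
  unfold Spec_has_required_metadata has_required_metadata has_required_metadata_alt
  simp only [PySem.List.slice_to_natCast, PySem.List.foldl_append_if_eq_filter, List.nil_append]
  rw [← pvHeaderA_eq]
  apply List.filter_congr
  intro p hp
  rw [pvContains_eq]
  · intro k hk
    rw [PySem.Set.mem_ofList] at hk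
    obtain ⟨q, _, rfl⟩ := List.mem_map.mp hk
    simp [pysem]
  · rw [PySem.Set.mem_ofList]
    refine List.mem_map.mpr ⟨p, hp, ?_⟩
    simp [pysem]
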